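-- pv_equiv track=rewrite | github.com/yingzhuo1994/LeetCode | 1745_PalindromePartitioning(4).py | palindromePartition
-- ===== SOURCE A (Python) =====
-- def palindromePartition(s: str, k: int) -> int:
--     n = len(s)
--     min_change = [[0] * n for _ in range(n)]
--     for i in range(n - 2, -1, -1):
--         for j in range(i + 1, n):
--             min_change[i][j] = min_change[i + 1][j - 1] + (1 if s[i] != s[j] else 0)
--
--     f = min_change[0]
--     for i in range(1, k):
--         for r in range(n - k + i, i - 1, -1):
--             f[r] = min(f[l - 1] + min_change[l][r] for l in range(i, r + 1))
--     return f[-1]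
-- ===== SOURCE B (Python) =====
-- def palindromePartition(s: str, k: int) -> int:
--     n = len(s)
--     min_change = [[0] * n for _ in range(n)]
--     for i in range(n - 2, -1, -1):
--         for j in range(i + 1, n):
--             min_change[i][j] = min_change[i + 1][j - 1] + (1 if s[i] != s[j] else 0)
--
--     memo = {}
--
--     def dp(r, parts):
--         # min changes to split s[0..r] into `parts` palindromes
--         if parts <= 1:
--             return min_change[0][r]
--         if (r, parts) in memo:
--             return memo[(r, parts)]
--         best = min(dp(l - 1, parts - 1) + min_change[l][r]
--                    for l in range(parts - 1, r + 1))
--         memo[(r, parts)] = best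
--         return best
--
--     return dp(n - 1, k)
-- ===== Notes on version B (the rewrite author's own statement) =====
-- stated objective: alternative
-- what changed: A's rolling-array bottom-up partition DP (in-place updates over a shrinking index window) is replaced by a top-down memoized recursion dp(r, parts) organized by partition count; the O(n^2) interval cost table is kept as A computes it.
-- outside the precondition, e.g. on palindromePartition('abc', 5): A returns 1, B raises ValueError
import Mathlib
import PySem

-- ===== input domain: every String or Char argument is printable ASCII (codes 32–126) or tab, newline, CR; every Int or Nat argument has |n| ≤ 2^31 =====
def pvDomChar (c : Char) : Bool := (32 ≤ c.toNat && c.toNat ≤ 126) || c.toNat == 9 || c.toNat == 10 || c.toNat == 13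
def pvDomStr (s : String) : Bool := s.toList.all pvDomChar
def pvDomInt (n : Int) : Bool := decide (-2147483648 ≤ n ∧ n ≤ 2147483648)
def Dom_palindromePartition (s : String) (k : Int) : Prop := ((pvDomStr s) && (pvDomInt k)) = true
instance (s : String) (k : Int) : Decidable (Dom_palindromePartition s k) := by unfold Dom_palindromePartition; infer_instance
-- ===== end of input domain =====

-- B replaces A's rolling-array bottom-up partition DP by a top-down memoized recursion on
-- (right index, number of parts); the interval cost table is built exactly as in A (objective: alternative).

-- ===== PORT A =====
-- s[i] (in both programs every character access has 0 ≤ i < len(s))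
def pvChr (cs : List Char) (i : Int) : Char := PySem.List.pyGetD cs i ' '

-- t[i][j] read / write on the 2-D table
def pvGet2 (t : List (List Int)) (i j : Int) : Int :=
  PySem.List.pyGetD (PySem.List.pyGetD t i []) j 0
def pvSet2 (t : List (List Int)) (i j : Int) (v : Int) : List (List Int) :=
  PySem.List.pySetD t i (PySem.List.pySetD (PySem.List.pyGetD t i []) j v)

-- the min_change table; BOTH Python versions build it with this identical double loop,
-- so both ports share this helper (a literal transliteration of that loop nest)
def pvMinChange (cs : List Char) : List (List Int) :=
  let n : Int := cs.length
  (PySem.List.pyRange (n - 2) (-1) (-1)).foldl (fun mc i =>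
    (PySem.List.pyRange (i + 1) n 1).foldl (fun mc j =>
      pvSet2 mc i j (pvGet2 mc (i + 1) (j - 1) + (if pvChr cs i ≠ pvChr cs j then 1 else 0))) mc)
    (List.replicate n.toNat (List.replicate n.toNat 0))

def palindromePartition (s : String) (k : Int) : Int :=
  let cs := s.toList
  let n : Int := cs.length
  let mc := pvMinChange cs
  let f := PySem.List.pyGetD mc 0 []
  let f := (PySem.List.pyRange 1 k 1).foldl (fun f i =>
    (PySem.List.pyRange (n - k + i) (i - 1) (-1)).foldl (fun f r =>
      PySem.List.pySetD f r
        ((PySem.List.min? ((PySem.List.pyRange i (r + 1) 1).map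
          (fun l => PySem.List.pyGetD f (l - 1) 0 + pvGet2 mc l r)) (fun x => x)).getD 0)) f) f
  (PySem.List.pyGet? f (-1)).getD 0   -- f[-1]; IndexError (n = 0) is excluded by Pre_

-- ===== PORT B =====
-- dp(r, parts) with the threaded memo dict; the recursion terminates because `parts`
-- strictly decreases and the recursive branch requires parts ≥ 2.
def pvDp (mc : List (List Int)) (parts : Int) (r : Int)
    (memo : PySem.Dict (Int × Int) Int) : Int × PySem.Dict (Int × Int) Int :=
  if parts ≤ 1 then (pvGet2 mc 0 r, memo)
  else
    match memo.get? (r, parts) with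
    | some v => (v, memo)
    | none =>
      let st := (PySem.List.pyRange (parts - 1) (r + 1) 1).foldl
        (fun (acc : List Int × PySem.Dict (Int × Int) Int) l =>
          let res := pvDp mc (parts - 1) (l - 1) acc.2
          (acc.1 ++ [res.1 + pvGet2 mc l r], res.2)) ([], memo)
      let best := (PySem.List.min? st.1 (fun x => x)).getD 0
      (best, st.2.insert (r, parts) best)
termination_by parts.toNat
decreasing_by omega

def palindromePartition_alt (s : String) (k : Int) : Int :=
  let cs := s.toList
  let n : Int := cs.length
  let mc := pvMinChange cs
  (pvDp mc k (n - 1) PySem.Dict.empty).1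

-- ===== PRECONDITION & SPEC =====
-- Pre_ excludes the empty string (A raises IndexError on f[-1]) and k > len(s) (there A's loops
-- never reach position n-1 and it returns the k-independent value min_change[0][n-1], an artefact
-- of the rolling array, while B's min over an empty range raises ValueError).
def Pre_palindromePartition (s : String) (k : Int) : Prop :=
  1 ≤ s.toList.length ∧ k ≤ (s.toList.length : Int)
instance (s : String) (k : Int) : Decidable (Pre_palindromePartition s k) := by
  unfold Pre_palindromePartition; infer_instance

def pvWitness_palindromePartition : String × Int := ("abcab", 2)

def Spec_palindromePartition (s : String) (k : Int) (out : Int) : Prop := out = palindromePartition_alt s k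
instance (s : String) (k : Int) (out : Int) : Decidable (Spec_palindromePartition s k out) := by unfold Spec_palindromePartition; infer_instance

-- ===== CLAIM (what is proved, stated in full; the proofs are below) =====
def Claim_equal_palindromePartition : Prop := ∀ (s : String) (k : Int), Dom_palindromePartition s k → Pre_palindromePartition s k → Spec_palindromePartition s k (palindromePartition s k)

-- ===== LEMMAS AND PROOFS =====

-- the interval cost: pvC cs l r = changes needed to make cs[l..r] a palindrome
def pvC (cs : List Char) (l r : Int) : Int :=
  if l < r then pvC cs (l + 1) (r - 1) + (if pvChr cs l ≠ pvChr cs r then 1 else 0) else 0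
termination_by (r - l).toNat
decreasing_by omega

-- the partition spec: pvP cs parts r = min changes to split cs[0..r] into `parts` palindromes
def pvP (cs : List Char) (parts : Nat) (r : Int) : Int :=
  match parts with
  | 0 => 0
  | 1 => pvC cs 0 r
  | p + 2 =>
    (PySem.List.min? ((PySem.List.pyRange ((p : Int) + 1) (r + 1) 1).map
      (fun l => pvP cs (p + 1) (l - 1) + pvC cs l r)) (fun x => x)).getD 0

-- ==== generic update/access facts used by both sides ====
theorem pv_getD_set {α : Type} (l : List α) (m b : Nat) (v : α) (d : α) (hm : m < l.length) :
    (l.set m v).getD b d = if b = m then v else l.getD b d := by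
  by_cases h : b = m
  · subst h; simp [List.getD, List.getElem?_set_self hm]
  · simp [List.getD, List.getElem?_set_ne (by omega : m ≠ b), h]

theorem pvC_of_le (cs : List Char) {l r : Int} (h : r ≤ l) : pvC cs l r = 0 := by
  rw [pvC]; simp [not_lt.mpr h]

theorem pvC_step (cs : List Char) {l r : Int} (h : l < r) :
    pvC cs l r = pvC cs (l + 1) (r - 1) + (if pvChr cs l ≠ pvChr cs r then 1 else 0) := by
  rw [pvC]; simp [h]

-- ==== table shape and access ====
def pvShape (cs : List Char) (t : List (List Int)) : Prop :=
  t.length = cs.length ∧ ∀ a : Nat, a < t.length → (t.getD a []).length = cs.length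

theorem pvGet2_nn (t : List (List Int)) {i j : Int} (hi : 0 ≤ i) (hj : 0 ≤ j) :
    pvGet2 t i j = (t.getD i.toNat []).getD j.toNat 0 := by
  simp [pvGet2, PySem.List.pyGetD_of_nonneg _ _ hi, PySem.List.pyGetD_of_nonneg _ _ hj]

theorem pvSet2_nn (t : List (List Int)) {i j : Int} (v : Int) (hi : 0 ≤ i) (hj : 0 ≤ j) :
    pvSet2 t i j v = t.set i.toNat ((t.getD i.toNat []).set j.toNat v) := by
  simp [pvSet2, PySem.List.pySetD_of_nonneg _ _ hi, PySem.List.pySetD_of_nonneg _ _ hj,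
        PySem.List.pyGetD_of_nonneg _ _ hi]

theorem pvShape_set2 (cs : List Char) (t : List (List Int)) (hs : pvShape cs t)
    {i j : Int} (v : Int) (hi : 0 ≤ i) (hj : 0 ≤ j) :
    pvShape cs (pvSet2 t i j v) := by
  obtain ⟨h1, h2⟩ := hs
  rw [pvSet2_nn t v hi hj]
  refine ⟨by simpa using h1, fun a ha => ?_⟩
  rw [List.length_set] at ha
  by_cases hm : i.toNat < t.length
  · rw [pv_getD_set _ _ _ _ _ hm]
    split_ifs with he
    · subst he; simpa [List.getD, List.length_set] using h2 _ hm
    · exact h2 a ha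
  · rw [List.set_eq_of_length_le (by omega)]
    exact h2 a ha

theorem pvGet2_set2 (cs : List Char) (t : List (List Int)) (hs : pvShape cs t)
    {i j a b : Int} (v : Int)
    (hi : 0 ≤ i) (hj : 0 ≤ j) (ha : 0 ≤ a) (hb : 0 ≤ b)
    (hin : i < (cs.length : Int)) (hjn : j < (cs.length : Int)) :
    pvGet2 (pvSet2 t i j v) a b = if a = i ∧ b = j then v else pvGet2 t a b := by
  obtain ⟨h1, h2⟩ := hs
  have hil : i.toNat < t.length := by omega
  have hjl : j.toNat < (t.getD i.toNat []).length := by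
    rw [h2 i.toNat hil]; omega
  rw [pvSet2_nn t v hi hj, pvGet2_nn _ ha hb, pvGet2_nn t ha hb,
      pv_getD_set _ _ _ _ _ hil]
  by_cases hai : a = i
  · rw [if_pos (by omega), pv_getD_set _ _ _ _ _ hjl]
    by_cases hbj : b = j
    · rw [if_pos (by omega), if_pos ⟨hai, hbj⟩]
    · rw [if_neg (by omega), if_neg (by simp [hbj]), hai]
  · rw [if_neg (by omega), if_neg (by simp [hai])]

theorem pvRowFill (cs : List Char) (i : Int) (hi0 : 0 ≤ i) (hi2 : i ≤ (cs.length : Int) - 2) :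
    ∀ (j : Int) (mc : List (List Int)), i + 1 ≤ j → j ≤ (cs.length : Int) → pvShape cs mc →
    (∀ a b : Int, i < a → a < (cs.length : Int) → 0 ≤ b → b < (cs.length : Int) →
       pvGet2 mc a b = pvC cs a b) →
    (∀ b : Int, i < b → b < j → pvGet2 mc i b = pvC cs i b) →
    ∀ mc', mc' = (PySem.List.pyRange j (cs.length : Int) 1).foldl (fun mc j =>
        pvSet2 mc i j (pvGet2 mc (i + 1) (j - 1) +
          (if pvChr cs i ≠ pvChr cs j then 1 else 0))) mc →
    (pvShape cs mc' ∧
     (∀ a b : Int, 0 ≤ a → a ≠ i → 0 ≤ b → pvGet2 mc' a b = pvGet2 mc a b) ∧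
     (∀ b : Int, i < b → b < (cs.length : Int) → pvGet2 mc' i b = pvC cs i b) ∧
     (∀ b : Int, 0 ≤ b → b ≤ i → pvGet2 mc' i b = pvGet2 mc i b)) := by
  intro j mc
  induction hN : ((cs.length : Int) - j).toNat generalizing j mc with
  | zero =>
    intro hj1 hj2 hs hhigh hprev mc' hmc'
    have hjn : (cs.length : Int) ≤ j := by omega
    rw [PySem.List.pyRange_one_eq_nil hjn, List.foldl_nil] at hmc'
    subst hmc'
    exact ⟨hs, fun a b _ _ _ => rfl, fun b hb1 hb2 => hprev b hb1 (by omega), fun b _ _ => rfl⟩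
  | succ m ih =>
    intro hj1 hj2 hs hhigh hprev mc' hmc'
    have hjn : j < (cs.length : Int) := by omega
    rw [PySem.List.pyRange_one_cons hjn, List.foldl_cons] at hmc'
    set w := pvGet2 mc (i + 1) (j - 1) + (if pvChr cs i ≠ pvChr cs j then 1 else 0) with hw
    have hwv : w = pvC cs i j := by
      have h1 : pvGet2 mc (i + 1) (j - 1) = pvC cs (i + 1) (j - 1) :=
        hhigh (i + 1) (j - 1) (by omega) (by omega) (by omega) (by omega)
      rw [hw, h1, ← pvC_step cs (by omega : i < j)]
    have hs1 := pvShape_set2 cs mc hs (i := i) (j := j) w hi0 (by omega)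
    have hget1 : ∀ a b : Int, 0 ≤ a → 0 ≤ b →
        pvGet2 (pvSet2 mc i j w) a b = if a = i ∧ b = j then w else pvGet2 mc a b :=
      fun a b ha hb => pvGet2_set2 cs mc hs w hi0 (by omega) ha hb (by omega) hjn
    obtain ⟨c1, c2, c3, c4⟩ := ih (j + 1) (pvSet2 mc i j w) (by omega) (by omega) (by omega) hs1
      (fun a b ha1 ha2 hb1 hb2 => by
        rw [hget1 a b (by omega) hb1, if_neg (by rintro ⟨rfl, _⟩; omega)]
        exact hhigh a b ha1 ha2 hb1 hb2)
      (fun b hb1 hb2 => by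
        rw [hget1 i b hi0 (by omega)]
        by_cases hbj : b = j
        · subst hbj; rw [if_pos ⟨rfl, rfl⟩]; exact hwv
        · rw [if_neg (by simp [hbj])]; exact hprev b hb1 (by omega))
      mc' hmc'
    refine ⟨c1, ?_, c3, ?_⟩
    · intro a b ha hne hb
      rw [c2 a b ha hne hb, hget1 a b ha hb, if_neg (by rintro ⟨rfl, _⟩; exact hne rfl)]
    · intro b hb1 hb2
      rw [c4 b hb1 hb2, hget1 i b hi0 hb1, if_neg (by rintro ⟨_, rfl⟩; omega)]

theorem pvRows (cs : List Char) :
    ∀ (I : Int) (mc : List (List Int)), I ≤ (cs.length : Int) - 2 → pvShape cs mc →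
    (∀ a b : Int, I < a → a < (cs.length : Int) → 0 ≤ b → b < (cs.length : Int) →
       pvGet2 mc a b = pvC cs a b) →
    (∀ a b : Int, 0 ≤ a → a ≤ I → 0 ≤ b → pvGet2 mc a b = 0) →
    ∀ mc', mc' = (PySem.List.pyRange I (-1) (-1)).foldl (fun mc i =>
        (PySem.List.pyRange (i + 1) (cs.length : Int) 1).foldl (fun mc j =>
          pvSet2 mc i j (pvGet2 mc (i + 1) (j - 1) +
            (if pvChr cs i ≠ pvChr cs j then 1 else 0))) mc) mc →
    (pvShape cs mc' ∧
     (∀ a b : Int, 0 ≤ a → a < (cs.length : Int) → 0 ≤ b → b < (cs.length : Int) →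
        pvGet2 mc' a b = pvC cs a b)) := by
  intro I mc
  induction hN : (I + 1).toNat generalizing I mc with
  | zero =>
    intro hI hs hhigh hzero mc' hmc'
    rw [PySem.List.pyRange_neg_one_eq_nil (by omega), List.foldl_nil] at hmc'
    subst hmc'
    exact ⟨hs, fun a b ha1 ha2 hb1 hb2 => hhigh a b (by omega) ha2 hb1 hb2⟩
  | succ m ih =>
    intro hI hs hhigh hzero mc' hmc'
    rw [PySem.List.pyRange_neg_one_cons (by omega : (-1:Int) < I), List.foldl_cons] at hmc'
    obtain ⟨c1, c2, c3, c4⟩ := pvRowFill cs I (by omega) hI (I + 1) mc (by omega) (by omega)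
      hs (fun a b ha1 ha2 hb1 hb2 => hhigh a b ha1 ha2 hb1 hb2)
      (fun b hb1 hb2 => by omega) _ rfl
    exact ih (I - 1) _ (by omega) (by omega) c1
      (fun a b ha1 ha2 hb1 hb2 => by
        by_cases hai : a = I
        · subst hai
          by_cases hba : b ≤ a
          · rw [c4 b hb1 hba, hzero a b (by omega) le_rfl hb1, pvC_of_le cs hba]
          · exact c3 b (by omega) hb2
        · rw [c2 a b (by omega) hai hb1]
          exact hhigh a b (by omega) ha2 hb1 hb2)
      (fun a b ha1 ha2 hb1 => by
        rw [c2 a b ha1 (by omega) hb1]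
        exact hzero a b ha1 (by omega) hb1)
      mc' hmc'

theorem pvInit_zero (cs : List Char) : ∀ a b : Int, 0 ≤ a → 0 ≤ b →
    pvGet2 (List.replicate cs.length (List.replicate cs.length (0 : Int))) a b = 0 := by
  intro a b ha hb
  rw [pvGet2_nn _ ha hb]
  have hrow : (List.replicate cs.length (List.replicate cs.length (0 : Int))).getD a.toNat [] =
      List.replicate cs.length 0 ∨
      (List.replicate cs.length (List.replicate cs.length (0 : Int))).getD a.toNat [] = [] := by
    rcases lt_or_ge a.toNat cs.length with h | h
    · left; rw [List.getD_eq_getElem _ _ (by simpa using h)]; simp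
    · right; rw [List.getD_eq_default _ _ (by simpa using h)]
  rcases hrow with h | h <;> rw [h]
  · rcases lt_or_ge b.toNat cs.length with h2 | h2
    · rw [List.getD_eq_getElem _ _ (by simpa using h2)]; simp
    · rw [List.getD_eq_default _ _ (by simpa using h2)]
  · simp [List.getD]

theorem pvInit_shape (cs : List Char) :
    pvShape cs (List.replicate cs.length (List.replicate cs.length (0 : Int))) := by
  refine ⟨by simp, fun a ha => ?_⟩
  simp only [List.length_replicate] at ha
  rw [List.getD_eq_getElem _ _ (by simpa using ha)]
  simp

theorem pvMinChange_eq (cs : List Char) :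
    pvMinChange cs = (PySem.List.pyRange ((cs.length : Int) - 2) (-1) (-1)).foldl (fun mc i =>
      (PySem.List.pyRange (i + 1) (cs.length : Int) 1).foldl (fun mc j =>
        pvSet2 mc i j (pvGet2 mc (i + 1) (j - 1) +
          (if pvChr cs i ≠ pvChr cs j then 1 else 0))) mc)
      (List.replicate cs.length (List.replicate cs.length 0)) := by
  simp [pvMinChange]

theorem pvMinChange_props (cs : List Char) :
    pvShape cs (pvMinChange cs) ∧
    (∀ a b : Int, 0 ≤ a → a < (cs.length : Int) → 0 ≤ b → b < (cs.length : Int) →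
       pvGet2 (pvMinChange cs) a b = pvC cs a b) := by
  refine pvRows cs ((cs.length : Int) - 2) _ (by omega) (pvInit_shape cs)
    (fun a b ha1 ha2 hb1 hb2 => ?_)
    (fun a b ha1 ha2 hb1 => pvInit_zero cs a b ha1 hb1)
    _ (pvMinChange_eq cs)
  rw [pvInit_zero cs a b (by omega) hb1, pvC_of_le cs (by omega)]


-- ==== A side: the rolling array computes pvP layer by layer ====
theorem pv_pyGetD_pySetD (f : List Int) (a b : Int) (v : Int) (ha : 0 ≤ a) (hb : 0 ≤ b)
    (hlen : a < (f.length : Int)) :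
    PySem.List.pyGetD (PySem.List.pySetD f a v) b 0 = if b = a then v else PySem.List.pyGetD f b 0 := by
  rw [PySem.List.pySetD_of_nonneg _ _ ha, PySem.List.pyGetD_of_nonneg _ _ hb,
      PySem.List.pyGetD_of_nonneg _ _ hb, pv_getD_set _ _ _ _ _ (by omega)]
  by_cases h : b = a
  · rw [if_pos (by omega), if_pos h]
  · rw [if_neg (by omega), if_neg h]

theorem pvP_one (cs : List Char) (r : Int) : pvP cs 1 r = pvC cs 0 r := by
  simp [pvP]

theorem pvP_succ (cs : List Char) (iN : Nat) (hi : 1 ≤ iN) (r : Int) :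
    pvP cs (iN + 1) r =
      (PySem.List.min? ((PySem.List.pyRange (iN : Int) (r + 1) 1).map
        (fun l => pvP cs iN (l - 1) + pvC cs l r)) (fun x => x)).getD 0 := by
  obtain ⟨pN, rfl⟩ : ∃ p, iN = p + 1 := ⟨iN - 1, by omega⟩
  show pvP cs (pN + 2) r = _
  rw [pvP]
  push_cast
  ring_nf

theorem pvAInner (cs : List Char) (mc : List (List Int))
    (hmc : ∀ a b : Int, 0 ≤ a → a < (cs.length : Int) → 0 ≤ b → b < (cs.length : Int) →
      pvGet2 mc a b = pvC cs a b)
    (i : Int) (hi1 : 1 ≤ i) :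
    ∀ (hi : Int) (f : List Int), i - 1 ≤ hi → hi ≤ (cs.length : Int) - 1 →
    f.length = cs.length →
    (∀ p : Int, i - 1 ≤ p → p < hi → PySem.List.pyGetD f p 0 = pvP cs i.toNat p) →
    ∀ f', f' = (PySem.List.pyRange hi (i - 1) (-1)).foldl (fun f r =>
        PySem.List.pySetD f r ((PySem.List.min? ((PySem.List.pyRange i (r + 1) 1).map
          (fun l => PySem.List.pyGetD f (l - 1) 0 + pvGet2 mc l r)) (fun x => x)).getD 0)) f →
    (f'.length = cs.length ∧
     (∀ p : Int, i ≤ p → p ≤ hi → PySem.List.pyGetD f' p 0 = pvP cs (i.toNat + 1) p) ∧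
     (∀ p : Int, 0 ≤ p → (p < i ∨ hi < p) → PySem.List.pyGetD f' p 0 = PySem.List.pyGetD f p 0)) := by
  intro hi f
  induction hN : (hi - (i - 1)).toNat generalizing hi f with
  | zero =>
    intro h1 h2 hlen hlow f' hf'
    rw [PySem.List.pyRange_neg_one_eq_nil (by omega), List.foldl_nil] at hf'
    subst hf'
    exact ⟨hlen, fun p hp1 hp2 => by omega, fun p _ _ => rfl⟩
  | succ m ih =>
    intro h1 h2 hlen hlow f' hf'
    rw [PySem.List.pyRange_neg_one_cons (by omega : i - 1 < hi), List.foldl_cons] at hf'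
    have hhi0 : i ≤ hi := by omega
    set w := (PySem.List.min? ((PySem.List.pyRange i (hi + 1) 1).map
      (fun l => PySem.List.pyGetD f (l - 1) 0 + pvGet2 mc l hi)) (fun x => x)).getD 0 with hw
    have hwv : w = pvP cs (i.toNat + 1) hi := by
      rw [pvP_succ cs i.toNat (by omega) hi, hw]
      have hcast : ((i.toNat : Nat) : Int) = i := by omega
      rw [hcast]
      congr 1
      congr 1
      apply List.map_congr_left
      intro l hl
      rw [PySem.List.mem_pyRange_one] at hl
      rw [hlow (l - 1) (by omega) (by omega),
          hmc l hi (by omega) (by omega) (by omega) (by omega)]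
    have hset : ∀ p : Int, 0 ≤ p →
        PySem.List.pyGetD (PySem.List.pySetD f hi w) p 0 =
          if p = hi then w else PySem.List.pyGetD f p 0 :=
      fun p hp => pv_pyGetD_pySetD f hi p w (by omega) hp (by omega)
    obtain ⟨c1, c2, c3⟩ := ih (hi - 1) (PySem.List.pySetD f hi w) (by omega) (by omega) (by omega)
      (by rw [PySem.List.length_pySetD]; exact hlen)
      (fun p hp1 hp2 => by
        rw [hset p (by omega), if_neg (by omega)]
        exact hlow p hp1 (by omega))
      f' hf'
    refine ⟨c1, ?_, ?_⟩
    · intro p hp1 hp2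
      by_cases hph : p = hi
      · subst hph
        rw [c3 p (by omega) (Or.inr (by omega)), hset p (by omega), if_pos rfl]
        exact hwv
      · exact c2 p hp1 (by omega)
    · intro p hp0 hp
      rw [c3 p hp0 (by rcases hp with h | h; exact Or.inl h; exact Or.inr (by omega)),
          hset p hp0, if_neg (by omega)]

theorem pvAOuter (cs : List Char) (mc : List (List Int)) (hsh : pvShape cs mc)
    (hmc : ∀ a b : Int, 0 ≤ a → a < (cs.length : Int) → 0 ≤ b → b < (cs.length : Int) →
      pvGet2 mc a b = pvC cs a b)
    (k : Int) (hk1 : 1 ≤ k) (hk2 : k ≤ (cs.length : Int)) :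
    ∀ (iN : Nat), (iN : Int) ≤ k - 1 →
    ∀ f', f' = (PySem.List.pyRange 1 ((iN : Int) + 1) 1).foldl (fun f i =>
        (PySem.List.pyRange ((cs.length : Int) - k + i) (i - 1) (-1)).foldl (fun f r =>
          PySem.List.pySetD f r ((PySem.List.min? ((PySem.List.pyRange i (r + 1) 1).map
            (fun l => PySem.List.pyGetD f (l - 1) 0 + pvGet2 mc l r)) (fun x => x)).getD 0)) f)
        (PySem.List.pyGetD mc 0 []) →
    (f'.length = cs.length ∧
     ∀ p : Int, (iN : Int) ≤ p → p ≤ (cs.length : Int) - k + iN →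
       PySem.List.pyGetD f' p 0 = pvP cs (iN + 1) p) := by
  intro iN
  induction iN with
  | zero =>
    intro _ f' hf'
    rw [PySem.List.pyRange_one_eq_nil (by omega), List.foldl_nil] at hf'
    subst hf'
    constructor
    · rw [PySem.List.pyGetD_of_nonneg _ _ (by omega : (0:Int) ≤ 0)]
      exact hsh.2 0 (by rw [hsh.1]; omega)
    · intro p hp1 hp2
      have : PySem.List.pyGetD (PySem.List.pyGetD mc 0 []) p 0 = pvGet2 mc 0 p := rfl
      rw [this, hmc 0 p (by omega) (by omega) (by omega) (by omega), pvP_one]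
  | succ iN ih =>
    intro hik f' hf'
    rw [show (((iN + 1 : Nat) : Int) + 1) = ((iN : Int) + 1) + 1 by push_cast; ring,
        PySem.List.pyRange_one_succ_right (by omega), List.foldl_append, List.foldl_cons,
        List.foldl_nil] at hf'
    obtain ⟨d1, d2⟩ := ih (by omega) _ rfl
    have hcast : ((iN : Int) + 1).toNat = iN + 1 := by omega
    obtain ⟨c1, c2, _⟩ := pvAInner cs mc hmc ((iN : Int) + 1) (by omega)
      ((cs.length : Int) - k + ((iN : Int) + 1)) _ (by omega) (by omega) d1
      (fun p hp1 hp2 => by rw [hcast]; exact d2 p (by omega) (by omega))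
      f' hf'
    refine ⟨c1, fun p hp1 hp2 => ?_⟩
    rw [← hcast]
    exact c2 p (by push_cast at hp1 ⊢; omega) (by push_cast at hp2 ⊢; omega)

theorem portA_eq (s : String) (k : Int) (h1 : 1 ≤ k) (h2 : k ≤ (s.toList.length : Int)) :
    palindromePartition s k = pvP s.toList k.toNat ((s.toList.length : Int) - 1) := by
  obtain ⟨hsh, hmc⟩ := pvMinChange_props s.toList
  have hk : k = (((k - 1).toNat : Nat) : Int) + 1 := by omega
  show (PySem.List.pyGet? ((PySem.List.pyRange 1 k 1).foldl (fun f i =>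
      (PySem.List.pyRange ((s.toList.length : Int) - k + i) (i - 1) (-1)).foldl (fun f r =>
        PySem.List.pySetD f r ((PySem.List.min? ((PySem.List.pyRange i (r + 1) 1).map
          (fun l => PySem.List.pyGetD f (l - 1) 0 + pvGet2 (pvMinChange s.toList) l r)) (fun x => x)).getD 0)) f)
      (PySem.List.pyGetD (pvMinChange s.toList) 0 [])) (-1)).getD 0 = _
  rw [show PySem.List.pyRange 1 k 1 = PySem.List.pyRange 1 ((((k - 1).toNat : Nat) : Int) + 1) 1 from by rw [← hk]]
  obtain ⟨d1, d2⟩ := pvAOuter s.toList (pvMinChange s.toList) hsh hmc k h1 h2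
    (k - 1).toNat (by omega) _ rfl
  have hval := d2 ((s.toList.length : Int) - 1) (by omega) (by omega)
  rw [PySem.List.pyGet?_neg_one, List.getLast?_eq_getElem?]
  rw [PySem.List.pyGetD_of_nonneg _ _ (by omega : (0:Int) ≤ (s.toList.length : Int) - 1)] at hval
  rw [show ((k - 1).toNat + 1) = k.toNat by omega] at hval
  simp only [List.getD] at hval
  have hidx : ∀ g : List Int, g.length = s.toList.length →
      g.length - 1 = ((s.toList.length : Int) - 1).toNat := fun g hg => by omega
  rw [hidx _ d1]
  exact hval

-- ==== B side: the memoized recursion computes pvP ====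
def pvInv (cs : List Char) (m : PySem.Dict (Int × Int) Int) : Prop :=
  ∀ (r q v : Int), m.get? (r, q) = some v → v = pvP cs q.toNat r

theorem pvDp_correct (cs : List Char) (mc : List (List Int))
    (hmc : ∀ a b : Int, 0 ≤ a → a < (cs.length : Int) → 0 ≤ b → b < (cs.length : Int) →
      pvGet2 mc a b = pvC cs a b) :
    ∀ (parts r : Int) (memo : PySem.Dict (Int × Int) Int),
    1 ≤ parts → parts - 1 ≤ r → r ≤ (cs.length : Int) - 1 → pvInv cs memo →
    ((pvDp mc parts r memo).1 = pvP cs parts.toNat r ∧ pvInv cs (pvDp mc parts r memo).2) := by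
  intro parts
  induction hN : parts.toNat generalizing parts with
  | zero => intro r memo h1 _ _ _; omega
  | succ m ih =>
    intro r memo h1 h2 h3 hinv
    rw [← hN]
    by_cases hp1 : parts ≤ 1
    · have hone : parts = 1 := by omega
      subst hone
      rw [pvDp, if_pos (by omega)]
      refine ⟨?_, hinv⟩
      show pvGet2 mc 0 r = pvP cs (1 : Int).toNat r
      rw [hmc 0 r le_rfl (by omega) (by omega) (by omega)]
      exact (pvP_one cs r).symm
    · rw [pvDp, if_neg hp1]
      cases hlook : memo.get? (r, parts) with
      | some v => exact ⟨hinv r parts v hlook, hinv⟩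
      | none =>
        have hfold : ∀ (lst : List Int) (acc : List Int × PySem.Dict (Int × Int) Int),
            (∀ l ∈ lst, parts - 1 ≤ l ∧ l ≤ r) → pvInv cs acc.2 →
            ((lst.foldl (fun (acc : List Int × PySem.Dict (Int × Int) Int) l =>
                let res := pvDp mc (parts - 1) (l - 1) acc.2
                (acc.1 ++ [res.1 + pvGet2 mc l r], res.2)) acc).1 =
              acc.1 ++ lst.map (fun l => pvP cs (parts - 1).toNat (l - 1) + pvC cs l r) ∧
             pvInv cs (lst.foldl (fun (acc : List Int × PySem.Dict (Int × Int) Int) l =>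
                let res := pvDp mc (parts - 1) (l - 1) acc.2
                (acc.1 ++ [res.1 + pvGet2 mc l r], res.2)) acc).2) := by
          intro lst
          induction lst with
          | nil => intro acc _ hi; simpa using hi
          | cons l t iht =>
            intro acc hmem hinv2
            have hl := hmem l List.mem_cons_self
            obtain ⟨e1, e2⟩ := ih (parts - 1) (by omega) (l - 1) acc.2 (by omega) (by omega)
              (by omega) hinv2
            simp only [List.foldl_cons]
            obtain ⟨g1, g2⟩ := iht (acc.1 ++ [(pvDp mc (parts - 1) (l - 1) acc.2).1 + pvGet2 mc l r],
                (pvDp mc (parts - 1) (l - 1) acc.2).2)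
              (fun x hx => hmem x (List.mem_cons_of_mem _ hx)) e2
            refine ⟨?_, g2⟩
            rw [g1]
            simp only [List.map_cons, List.append_assoc, List.singleton_append]
            congr 2
            rw [e1, show (parts - 1).toNat = m from by omega,
                hmc l r (by omega) (by omega) (by omega) (by omega)]
        obtain ⟨g1, g2⟩ := hfold (PySem.List.pyRange (parts - 1) (r + 1) 1) ([], memo)
          (fun l hl => by rw [PySem.List.mem_pyRange_one] at hl; omega) hinv
        have hbest : (PySem.List.min? ((PySem.List.pyRange (parts - 1) (r + 1) 1).map
            (fun l => pvP cs (parts - 1).toNat (l - 1) + pvC cs l r)) (fun x => x)).getD 0 =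
            pvP cs parts.toNat r := by
          obtain ⟨pN, hpN⟩ : ∃ p : Nat, parts.toNat = p + 2 := ⟨parts.toNat - 2, by omega⟩
          rw [hpN, pvP, show (parts - 1).toNat = pN + 1 from by omega,
              show parts - 1 = (pN : Int) + 1 from by omega]
        refine ⟨?_, ?_⟩
        · show (PySem.List.min? ((PySem.List.pyRange (parts - 1) (r + 1) 1).foldl
            (fun (acc : List Int × PySem.Dict (Int × Int) Int) l =>
              let res := pvDp mc (parts - 1) (l - 1) acc.2
              (acc.1 ++ [res.1 + pvGet2 mc l r], res.2)) ([], memo)).1 (fun x => x)).getD 0 = _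
          rw [g1, List.nil_append, hbest]
        · intro r' q' v' hv
          rw [PySem.Dict.get?_insert] at hv
          by_cases hkey : (r', q') = (r, parts)
          · rw [if_pos hkey] at hv
            have hr : r' = r := (Prod.mk.injEq _ _ _ _ ▸ hkey).1
            have hq : q' = parts := (Prod.mk.injEq _ _ _ _ ▸ hkey).2
            rw [hr, hq, ← Option.some_inj.mp hv]
            show (PySem.List.min? ((PySem.List.pyRange (parts - 1) (r + 1) 1).foldl
              (fun (acc : List Int × PySem.Dict (Int × Int) Int) l =>
                let res := pvDp mc (parts - 1) (l - 1) acc.2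
                (acc.1 ++ [res.1 + pvGet2 mc l r], res.2)) ([], memo)).1 (fun x => x)).getD 0 = _
            rw [g1, List.nil_append, hbest]
          · rw [if_neg hkey] at hv
            exact g2 r' q' v' hv

theorem portB_eq (s : String) (k : Int) (h1 : 1 ≤ k) (h2 : k ≤ (s.toList.length : Int)) :
    palindromePartition_alt s k = pvP s.toList k.toNat ((s.toList.length : Int) - 1) := by
  obtain ⟨hsh, hmc⟩ := pvMinChange_props s.toList
  have hempty : pvInv s.toList PySem.Dict.empty := by
    intro r q v h
    simp [pysem, PySem.Dict.empty, PySem.Dict.get?] at h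
  exact (pvDp_correct s.toList (pvMinChange s.toList) hmc k
    ((s.toList.length : Int) - 1) PySem.Dict.empty h1 (by omega) (by omega) hempty).1

-- ==== both ports on k ≤ 0: the value of the untouched row 0 at position n-1 ====
theorem portA_low (s : String) (k : Int) (hk : k ≤ 0) (hn : 1 ≤ s.toList.length) :
    palindromePartition s k = pvC s.toList 0 ((s.toList.length : Int) - 1) := by
  obtain ⟨hsh, hmc⟩ := pvMinChange_props s.toList
  show (PySem.List.pyGet? ((PySem.List.pyRange 1 k 1).foldl (fun f i =>
      (PySem.List.pyRange ((s.toList.length : Int) - k + i) (i - 1) (-1)).foldl (fun f r =>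
        PySem.List.pySetD f r ((PySem.List.min? ((PySem.List.pyRange i (r + 1) 1).map
          (fun l => PySem.List.pyGetD f (l - 1) 0 + pvGet2 (pvMinChange s.toList) l r)) (fun x => x)).getD 0)) f)
      (PySem.List.pyGetD (pvMinChange s.toList) 0 [])) (-1)).getD 0 = _
  rw [PySem.List.pyRange_one_eq_nil (by omega), List.foldl_nil]
  have hlen : (PySem.List.pyGetD (pvMinChange s.toList) 0 []).length = s.toList.length := by
    rw [PySem.List.pyGetD_of_nonneg _ _ le_rfl]
    exact hsh.2 0 (by rw [hsh.1]; omega)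
  have hval : PySem.List.pyGetD (PySem.List.pyGetD (pvMinChange s.toList) 0 [])
      ((s.toList.length : Int) - 1) 0 = pvC s.toList 0 ((s.toList.length : Int) - 1) :=
    hmc 0 _ le_rfl (by omega) (by omega) (by omega)
  rw [PySem.List.pyGetD_of_nonneg _ _ (by omega : (0:Int) ≤ (s.toList.length : Int) - 1)] at hval
  simp only [List.getD] at hval
  rw [PySem.List.pyGet?_neg_one, List.getLast?_eq_getElem?]
  have hidx : ∀ g : List Int, g.length = s.toList.length →
      g.length - 1 = ((s.toList.length : Int) - 1).toNat := fun g hg => by omega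
  rw [hidx _ hlen]
  exact hval

theorem portB_low (s : String) (k : Int) (hk : k ≤ 0) (hn : 1 ≤ s.toList.length) :
    palindromePartition_alt s k = pvC s.toList 0 ((s.toList.length : Int) - 1) := by
  obtain ⟨hsh, hmc⟩ := pvMinChange_props s.toList
  show (pvDp (pvMinChange s.toList) k ((s.toList.length : Int) - 1) PySem.Dict.empty).1 = _
  rw [pvDp, if_pos (by omega)]
  exact hmc 0 _ le_rfl (by omega) (by omega) (by omega)

-- ===== VERDICT (by name: the statement is the Claim_ definition above) =====
theorem palindromePartition_spec : Claim_equal_palindromePartition := by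
  intro s k _ hpre
  unfold Spec_palindromePartition
  by_cases hk : 1 ≤ k
  · rw [portA_eq s k hk hpre.2, portB_eq s k hk hpre.2]
  · rw [portA_low s k (by omega) hpre.1, portB_low s k (by omega) hpre.1]
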